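-- pv_equiv track=rewrite | github.com/pypi-data/pypi-mirror-403 | packages/aixtools/aixtools-0.10.1.tar.gz/aixtools-0.10.1/aixtools/utils/utils.py | tripple_quote_strip
-- ===== SOURCE A (Python) =====
-- def tripple_quote_strip(s):
--     """
--     Remove triple quotes from a string, including those with language specifications.
--
--     Eexamples:
--         ```sql SELECT * from table;```
--
--         ```Here is your code ```python c = a + b ``` This code will perform addition```
--
--     Args:
--         s (str): The input string potentially containing triple quotes.
--
--     Returns:
--         str: The string with triple quotes removed, if present.
--     """
--     if "```" not in s:
--         return s
--     left_pos, right_pos = len(s), s.rfind("```")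
--     s_lower = s.lower()
--     pre_matched = ""
--     for lang in ["python3", "python2", "python", "bash", "json", "sql", ""]:
--         pre = f"```{lang}"
--         idx = s_lower.find(pre)
--         if idx != -1 and idx < left_pos:
--             left_pos = idx
--             pre_matched = pre
--     if left_pos < right_pos:
--         s = s[left_pos + len(pre_matched) : right_pos].strip()
--     return s
-- ===== SOURCE B (Python) =====
-- def tripple_quote_strip(s):
--     if "```" not in s:
--         return s
--     s_lower = s.lower()
--     p = s_lower.find("```")
--     right = s.rfind("```")
--     pre = "```"
--     for lang in ["python3", "python2", "python", "bash", "json", "sql"]: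
--         if s_lower.startswith("```" + lang, p):
--             pre = "```" + lang
--             break
--     if p < right:
--         s = s[p + len(pre): right].strip()
--     return s
-- ===== Notes on version B (the rewrite author's own statement) =====
-- stated objective: alternative
-- what changed: A scans the whole string once per language tag (7 find calls) and tracks the minimum index with its tag; B finds the first fence once and classifies the tag by a startswith test at that single position (first match in priority order, defaulting to bare ```).
import Mathlib
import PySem

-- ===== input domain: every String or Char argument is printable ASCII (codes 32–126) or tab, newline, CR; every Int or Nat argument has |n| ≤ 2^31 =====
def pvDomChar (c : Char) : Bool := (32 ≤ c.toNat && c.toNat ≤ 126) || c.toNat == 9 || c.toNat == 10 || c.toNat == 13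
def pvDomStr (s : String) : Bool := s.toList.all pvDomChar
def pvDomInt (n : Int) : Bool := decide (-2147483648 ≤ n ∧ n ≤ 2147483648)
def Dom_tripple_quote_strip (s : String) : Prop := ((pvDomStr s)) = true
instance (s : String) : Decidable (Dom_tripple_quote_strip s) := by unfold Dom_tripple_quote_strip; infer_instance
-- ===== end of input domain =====

-- B replaces A's per-language full-string minimum-index scan by one find of the first fence
-- plus a startswith classification of the tag at that single position (alternative decomposition).

-- ===== PORT A =====
-- the loop body of A's 'for lang in [...]' over the state (left_pos, pre_matched)
def pvStep (sLower : String) (st : Int × String) (lang : String) : Int × String :=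
  let pre := "```" ++ lang
  let idx := PySem.Str.find sLower pre
  if idx ≠ -1 ∧ idx < st.1 then (idx, pre) else st

def tripple_quote_strip (s : String) : String :=
  if PySem.Str.isIn "```" s = false then s
  else
    let rightPos := PySem.Str.rfind s "```"
    let sLower := PySem.Str.lower s
    let st := ["python3", "python2", "python", "bash", "json", "sql", ""].foldl
                (pvStep sLower) ((PySem.Str.len s), "")
    if st.1 < rightPos then
      PySem.Str.strip (PySem.Str.slice s (some (st.1 + PySem.Str.len st.2)) (some rightPos))
    else s

-- ===== PORT B =====
-- s_lower.startswith("```" + lang, p): exact, since at the call site 0 ≤ p ≤ len(s_lower)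
def pvMatchAt (sLower : String) (p : Int) (lang : String) : Bool :=
  PySem.Chars.startswith (sLower.toList.drop p.toNat) ("```" ++ lang).toList

def tripple_quote_strip_alt (s : String) : String :=
  if PySem.Str.isIn "```" s = false then s
  else
    let sLower := PySem.Str.lower s
    let p := PySem.Str.find sLower "```"
    let right := PySem.Str.rfind s "```"
    -- the for/break loop: the first language whose tag sits right at the first fence, default "```"
    let pre := match ["python3", "python2", "python", "bash", "json", "sql"].find? (pvMatchAt sLower p) with
      | some lang => "```" ++ lang
      | none => "```"
    if p < right then
      PySem.Str.strip (PySem.Str.slice s (some (p + PySem.Str.len pre)) (some right))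
    else s

-- ===== PRECONDITION & SPEC =====
def Spec_tripple_quote_strip (s : String) (out : String) : Prop := out = tripple_quote_strip_alt s
instance (s : String) (out : String) : Decidable (Spec_tripple_quote_strip s out) := by unfold Spec_tripple_quote_strip; infer_instance

-- ===== CLAIM (what is proved, stated in full; the proofs are below) =====
def Claim_equal_tripple_quote_strip : Prop := ∀ (s : String), Dom_tripple_quote_strip s → Spec_tripple_quote_strip s (tripple_quote_strip s)

-- ===== LEMMAS AND PROOFS =====

-- any occurrence of "```" ++ t is an occurrence of "```": find of the longer pattern is -1 or ≥ find "```"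
lemma pv_find_ge (L pre : List Char) (hpre : "```".toList <+: pre) :
    PySem.Chars.find L pre = -1 ∨ PySem.Chars.find L "```".toList ≤ PySem.Chars.find L pre := by
  by_cases h : PySem.Chars.find L pre = -1
  · exact Or.inl h
  · right
    have hnn : 0 ≤ PySem.Chars.find L pre := by
      have := PySem.Chars.neg_one_le_find L pre; omega
    obtain ⟨hat, _hmin⟩ := PySem.Chars.find_spec hnn
    have hbt : "```".toList <+: L.drop (PySem.Chars.find L pre).toNat := hpre.trans hat
    have hin : "```".toList <:+: L := hbt.isInfix.trans (List.drop_suffix _ L).isInfix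
    have hnn' : 0 ≤ PySem.Chars.find L "```".toList := (PySem.Chars.find_nonneg_iff L _).mpr hin
    obtain ⟨_, hmin'⟩ := PySem.Chars.find_spec hnn'
    by_contra hlt
    have hlt2 : (PySem.Chars.find L pre).toNat < (PySem.Chars.find L "```".toList).toNat := by omega
    exact hmin' _ hlt2 hbt

-- the pattern "```" ++ t first occurs exactly at find "```" iff it occurs AT that position
lemma pv_find_eq_iff (L pre : List Char) (hpre : "```".toList <+: pre)
    (hnn : 0 ≤ PySem.Chars.find L "```".toList) :
    PySem.Chars.find L pre = PySem.Chars.find L "```".toList ↔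
      pre <+: L.drop (PySem.Chars.find L "```".toList).toNat := by
  constructor
  · intro he
    have hnn' : 0 ≤ PySem.Chars.find L pre := he ▸ hnn
    obtain ⟨hat, _⟩ := PySem.Chars.find_spec hnn'
    rwa [he] at hat
  · intro hat
    have hin : pre <:+: L := hat.isInfix.trans (List.drop_suffix _ L).isInfix
    have hne : PySem.Chars.find L pre ≠ -1 := (PySem.Chars.find_ne_neg_one_iff L pre).mpr hin
    have hge := (pv_find_ge L pre hpre).resolve_left hne
    have hnn' : 0 ≤ PySem.Chars.find L pre := le_trans hnn hge
    obtain ⟨_, hmin⟩ := PySem.Chars.find_spec hnn'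
    by_contra hne2
    have hlt2 : (PySem.Chars.find L "```".toList).toNat < (PySem.Chars.find L pre).toNat := by omega
    exact hmin _ hlt2 hat

-- once the state is (p, pre), no later language can lower it
lemma pv_loop_stable (sLower : String) (p : Int)
    (H : ∀ lang : String, PySem.Str.find sLower ("```" ++ lang) = -1 ∨ p ≤ PySem.Str.find sLower ("```" ++ lang)) :
    ∀ (langs : List String) (pre0 : String),
      langs.foldl (pvStep sLower) (p, pre0) = (p, pre0) := by
  intro langs
  induction langs with
  | nil => intro pre0; rfl
  | cons a t ih =>
    intro pre0
    have hcond : ¬ (PySem.Str.find sLower ("```" ++ a) ≠ -1 ∧ PySem.Str.find sLower ("```" ++ a) < p) := by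
      rcases H a with h | h <;> omega
    simp only [List.foldl_cons, pvStep]
    rw [if_neg hcond]
    exact ih pre0

-- if the first language of langs matching at p is l, the loop ends at (p, "```" ++ l)
lemma pv_loop_match (sLower : String) (p : Int) (hp0 : 0 ≤ p)
    (H : ∀ lang : String, PySem.Str.find sLower ("```" ++ lang) = -1 ∨ p ≤ PySem.Str.find sLower ("```" ++ lang))
    (HC : ∀ lang : String, pvMatchAt sLower p lang = true ↔ PySem.Str.find sLower ("```" ++ lang) = p) :
    ∀ (langs : List String) (st : Int × String) (l : String), p < st.1 →
      langs.find? (pvMatchAt sLower p) = some l →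
      langs.foldl (pvStep sLower) st = (p, "```" ++ l) := by
  intro langs
  induction langs with
  | nil => intro st l _ h; simp at h
  | cons a t ih =>
    intro st l hlt hf
    by_cases hMa : pvMatchAt sLower p a = true
    · have hla : l = a := by
        rw [List.find?_cons, hMa] at hf; exact (Option.some.inj hf).symm
      have heq : PySem.Str.find sLower ("```" ++ a) = p := (HC a).mp hMa
      simp only [List.foldl_cons, pvStep]
      rw [if_pos (by constructor <;> omega), heq]
      rw [hla]
      exact pv_loop_stable sLower p H t ("```" ++ a)
    · have hft : t.find? (pvMatchAt sLower p) = some l := by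
        rw [List.find?_cons] at hf
        simpa [hMa] using hf
      have hne : PySem.Str.find sLower ("```" ++ a) ≠ p := fun h => hMa ((HC a).mpr h)
      simp only [List.foldl_cons, pvStep]
      by_cases hc : PySem.Str.find sLower ("```" ++ a) ≠ -1 ∧ PySem.Str.find sLower ("```" ++ a) < st.1
      · rw [if_pos hc]
        refine ih _ l ?_ hft
        rcases H a with h | h
        · omega
        · show p < PySem.Str.find sLower ("```" ++ a); omega
      · rw [if_neg hc]; exact ih st l hlt hft

-- if no language of langs matches at p, the loop keeps left_pos strictly above p
lemma pv_loop_nomatch (sLower : String) (p : Int)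
    (H : ∀ lang : String, PySem.Str.find sLower ("```" ++ lang) = -1 ∨ p ≤ PySem.Str.find sLower ("```" ++ lang))
    (HC : ∀ lang : String, pvMatchAt sLower p lang = true ↔ PySem.Str.find sLower ("```" ++ lang) = p) :
    ∀ (langs : List String) (st : Int × String), p < st.1 →
      langs.find? (pvMatchAt sLower p) = none →
      p < (langs.foldl (pvStep sLower) st).1 := by
  intro langs
  induction langs with
  | nil => intro st h _; exact h
  | cons a t ih =>
    intro st hlt hf
    rw [List.find?_cons] at hf
    have hMa : pvMatchAt sLower p a = false := by
      cases h : pvMatchAt sLower p a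
      · rfl
      · rw [h] at hf; simp at hf
    rw [hMa] at hf
    have hne : PySem.Str.find sLower ("```" ++ a) ≠ p := fun h => by
      rw [(HC a).mpr h] at hMa; simp at hMa
    simp only [List.foldl_cons, pvStep]
    by_cases hc : PySem.Str.find sLower ("```" ++ a) ≠ -1 ∧ PySem.Str.find sLower ("```" ++ a) < st.1
    · rw [if_pos hc]
      refine ih _ ?_ hf
      rcases H a with h | h
      · omega
      · show p < PySem.Str.find sLower ("```" ++ a); omega
    · rw [if_neg hc]; exact ih st hlt hf

-- B's startswith test at p is exactly 'this tag's first occurrence is at the first fence'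
lemma pv_HC (sLower : String) (hinfL : "```".toList <:+: sLower.toList) (lang : String) :
    pvMatchAt sLower (PySem.Str.find sLower "```") lang = true
      ↔ PySem.Str.find sLower ("```" ++ lang) = PySem.Str.find sLower "```" := by
  have hnn : 0 ≤ PySem.Chars.find sLower.toList "```".toList :=
    (PySem.Chars.find_nonneg_iff _ _).mpr hinfL
  rw [pvMatchAt, PySem.Chars.startswith_iff, PySem.Str.find_eq, PySem.Str.find_eq]
  exact (pv_find_eq_iff _ _ (by rw [String.toList_append]; exact List.prefix_append _ _) hnn).symm

lemma pv_H (sLower : String) (lang : String) :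
    PySem.Str.find sLower ("```" ++ lang) = -1 ∨
      PySem.Str.find sLower "```" ≤ PySem.Str.find sLower ("```" ++ lang) := by
  rw [PySem.Str.find_eq, PySem.Str.find_eq]
  exact pv_find_ge _ _ (by rw [String.toList_append]; exact List.prefix_append _ _)

-- ===== VERDICT (by name: the statement is the Claim_ definition above) =====
theorem tripple_quote_strip_spec : Claim_equal_tripple_quote_strip := by
  intro s _
  show tripple_quote_strip s = tripple_quote_strip_alt s
  by_cases hg : PySem.Str.isIn "```" s = false
  · unfold tripple_quote_strip tripple_quote_strip_alt
    rw [if_pos hg, if_pos hg]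
  · have hinfL : "```".toList <:+: (PySem.Str.lower s).toList := by
      have hin : PySem.Chars.isIn "```".toList s.toList = true := by
        have := Bool.of_not_eq_false hg
        rwa [PySem.Str.isIn_eq] at this
      have hinf : "```".toList <:+: s.toList := (PySem.Chars.isIn_iff_infix _ _).mp hin
      rw [PySem.Str.toList_lower]
      simp only [PySem.Chars.lower]
      have := hinf.map PySem.Chars.lowerChar
      simpa using this
    have hP : PySem.Str.find (PySem.Str.lower s) "```"
        = PySem.Chars.find (PySem.Str.lower s).toList "```".toList := PySem.Str.find_eq _ _
    have hp0 : 0 ≤ PySem.Str.find (PySem.Str.lower s) "```" := by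
      rw [hP]; exact (PySem.Chars.find_nonneg_iff _ _).mpr hinfL
    have hLlen : (PySem.Str.lower s).toList.length = s.toList.length := by
      rw [PySem.Str.toList_lower]; simp [PySem.Chars.lower]
    have hplen : PySem.Str.find (PySem.Str.lower s) "```" < PySem.Str.len s := by
      obtain ⟨hat, _⟩ := PySem.Chars.find_spec (hP ▸ hp0)
      have h3 := hat.length_le
      rw [List.length_drop] at h3
      have h33 : ("```".toList).length = 3 := by decide
      rw [PySem.Str.len_eq, hP]
      omega
    have hlast : ("```" ++ "" : String) = "```" := by simp
    have hfold : ∀ pre : String,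
        (match (["python3", "python2", "python", "bash", "json", "sql"] : List String).find?
            (pvMatchAt (PySem.Str.lower s) (PySem.Str.find (PySem.Str.lower s) "```")) with
          | some lang => "```" ++ lang
          | none => "```") = pre →
        (["python3", "python2", "python", "bash", "json", "sql", ""] : List String).foldl
          (pvStep (PySem.Str.lower s)) ((PySem.Str.len s), "")
          = (PySem.Str.find (PySem.Str.lower s) "```", pre) := by
      intro pre hpre
      have hsplit : (["python3", "python2", "python", "bash", "json", "sql", ""] : List String)
          = ["python3", "python2", "python", "bash", "json", "sql"] ++ [""] := rfl
      rw [hsplit, List.foldl_concat]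
      have hp0' : PySem.Str.find (PySem.Str.lower s) "```" < ((PySem.Str.len s : Int), ("" : String)).1 := hplen
      cases hf : (["python3", "python2", "python", "bash", "json", "sql"] : List String).find?
          (pvMatchAt (PySem.Str.lower s) (PySem.Str.find (PySem.Str.lower s) "```")) with
      | some l =>
        rw [pv_loop_match (PySem.Str.lower s) _ hp0 (pv_H _) (pv_HC _ hinfL) _ _ l hp0' hf]
        rw [hf] at hpre
        simp only [pvStep, hlast]
        rw [if_neg (by omega)]
        rw [← hpre]
      | none =>
        have hgt := pv_loop_nomatch (PySem.Str.lower s) _ (pv_H _) (pv_HC _ hinfL) _ _ hp0' hf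
        rw [hf] at hpre
        simp only [pvStep, hlast]
        rw [if_pos ⟨by omega, hgt⟩]
        rw [← hpre]
    cases hf : (["python3", "python2", "python", "bash", "json", "sql"] : List String).find?
        (pvMatchAt (PySem.Str.lower s) (PySem.Str.find (PySem.Str.lower s) "```")) with
    | some l =>
      have hfl := hfold ("```" ++ l) (by rw [hf])
      unfold tripple_quote_strip tripple_quote_strip_alt
      rw [if_neg hg, if_neg hg]
      simp only [hf, hfl]
    | none =>
      have hfl := hfold "```" (by rw [hf])
      unfold tripple_quote_strip tripple_quote_strip_alt
      rw [if_neg hg, if_neg hg]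
      simp only [hf, hfl]
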